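-- pv_equiv track=rewrite | github.com/jso122-2/DAWN_pub_real | semantic/parmenides_token_linker.py | _identify_unlinked_tokens
-- ===== SOURCE A (Python) =====
-- from typing import Dict, List, Set, Tuple, Optional
--
-- def _identify_unlinked_tokens(
--                             token_history: List[Dict],
--                             linked_tokens: List[Dict]) -> List[str]:
--     """
--     Identify tokens that remained unlinked.
--
--     Args:
--         token_history: Original token history
--         linked_tokens: List of linked tokens
--
--     Returns:
--         List of unlinked token strings
--     """
--     # Get all tokens that were linked
--     linked_token_set = set(lt['token'] for lt in linked_tokens)
--
--     # Find tokens that appear only once or weren't linked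
--     token_bloom_map = {}
--     for token_data in token_history:
--         token = token_data['token']
--         bloom_id = token_data['bloom_id']
--
--         if token not in token_bloom_map:
--             token_bloom_map[token] = set()
--         token_bloom_map[token].add(bloom_id)
--
--     unlinked = []
--     for token, bloom_ids in token_bloom_map.items():
--         if len(bloom_ids) == 1 and token not in linked_token_set:
--             unlinked.append(token)
--
--     return sorted(list(set(unlinked)))
-- ===== SOURCE B (Python) =====
-- def _identify_unlinked_tokens(token_history, linked_tokens):
--     # Sort-then-scan: sort the (token, bloom_id) pairs by token once, then a single
--     # linear scan over contiguous token groups emits each qualifying token already in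
--     # order -- no per-token dict/set tally and no final sort of the result.
--     linked = {lt['token'] for lt in linked_tokens}
--     pairs = sorted(((td['token'], td['bloom_id']) for td in token_history),
--                    key=lambda p: p[0])
--     out = []
--     i = 0
--     n = len(pairs)
--     while i < n:
--         t, b = pairs[i]
--         j = i + 1
--         same = True
--         while j < n and pairs[j][0] == t:
--             same = same and pairs[j][1] == b
--             j += 1
--         if same and t not in linked:
--             out.append(t)
--         i = j
--     return out
-- ===== Notes on version B (the rewrite author's own statement) =====
-- stated objective: alternative
-- what changed: Replaces A's hash-based tally (dict of per-token bloom sets, then an items pass, then a final sort of the result) with sort-then-scan: sort the (token, bloom_id) pairs by token once, then a single linear index scan over contiguous token runs that emits each qualifying token, producing the output already in sorted order with no dict, no per-token set and no final sort.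
import Mathlib
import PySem

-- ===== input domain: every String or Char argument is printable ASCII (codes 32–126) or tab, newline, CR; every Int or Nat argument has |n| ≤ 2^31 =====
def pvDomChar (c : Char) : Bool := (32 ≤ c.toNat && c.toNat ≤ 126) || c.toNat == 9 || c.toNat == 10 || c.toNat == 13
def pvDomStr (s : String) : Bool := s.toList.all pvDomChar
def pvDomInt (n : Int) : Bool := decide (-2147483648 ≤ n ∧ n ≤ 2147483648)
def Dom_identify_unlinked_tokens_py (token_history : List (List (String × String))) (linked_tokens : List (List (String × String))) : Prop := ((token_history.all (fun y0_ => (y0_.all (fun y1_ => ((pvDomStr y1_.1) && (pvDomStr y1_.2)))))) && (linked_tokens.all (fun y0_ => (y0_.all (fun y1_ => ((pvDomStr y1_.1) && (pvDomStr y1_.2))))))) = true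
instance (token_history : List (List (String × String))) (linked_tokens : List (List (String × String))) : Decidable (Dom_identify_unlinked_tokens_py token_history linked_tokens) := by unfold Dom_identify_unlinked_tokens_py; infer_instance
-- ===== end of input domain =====

-- B replaces A's hash-tally-then-sort with sort-then-scan (sort the pairs by token, one linear
-- scan over contiguous groups, output emitted already in order); same result wherever A raises no KeyError.

-- ===== PORT A =====
-- shared helper: d[k] for an association-list dict (first match; Pre_ guarantees the key is present,
-- so the "" default is never consulted on admitted inputs)
def pvKey (d : List (String × String)) (k : String) : String :=
  ((PySem.Dict.mk d).get? k).getD ""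

def identify_unlinked_tokens_py (token_history : List (List (String × String))) (linked_tokens : List (List (String × String))) : List String :=
  -- linked_token_set = set(lt['token'] for lt in linked_tokens)
  let linked_token_set : PySem.Set String :=
    PySem.Set.ofList (linked_tokens.map (fun lt => pvKey lt "token"))
  -- for td in token_history: if token not in map: map[token] = set();  map[token].add(bloom_id)
  let token_bloom_map : PySem.Dict String (PySem.Set String) :=
    token_history.foldl (fun m td =>
      let token := pvKey td "token"
      let bloom_id := pvKey td "bloom_id"
      let m' := if m.contains token then m else m.insert token PySem.Set.empty
      m'.modify token PySem.Set.empty (fun s => PySem.Set.add s bloom_id)) PySem.Dict.empty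
  -- for token, bloom_ids in map.items(): if len(bloom_ids) == 1 and token not in linked: unlinked.append(token)
  let unlinked : List String :=
    token_bloom_map.items.foldl (fun acc p =>
      if PySem.Set.len p.2 == 1 && !(linked_token_set.contains p.1) then acc ++ [p.1] else acc) []
  -- return sorted(list(set(unlinked)))
  PySem.List.sorted (PySem.Set.ofList unlinked) (fun x => x) false

-- ===== PORT B =====
-- the outer while loop of Source B: each step consumes one maximal run of equal tokens
-- (the inner 'while j < n and pairs[j][0] == t' = takeWhile/dropWhile; 'same = same and …' = all)
def pvScanGroups (linked : PySem.Set String) : List (String × String) → List String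
  | [] => []
  | (t, b) :: rest =>
      let grp := rest.takeWhile (fun p => p.1 == t)
      let same := grp.all (fun p => p.2 == b)
      let rest' := rest.dropWhile (fun p => p.1 == t)
      (if same && !(linked.contains t) then [t] else []) ++ pvScanGroups linked rest'
termination_by S => S.length
decreasing_by
  have h := List.length_dropWhile_le (fun p : String × String => p.1 == t) rest
  simp only [List.length_cons]
  omega

def identify_unlinked_tokens_py_alt (token_history : List (List (String × String))) (linked_tokens : List (List (String × String))) : List String :=
  -- linked = {lt['token'] for lt in linked_tokens}
  let linked : PySem.Set String :=
    PySem.Set.ofList (linked_tokens.map (fun lt => pvKey lt "token"))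
  -- pairs = sorted(((td['token'], td['bloom_id']) for td in token_history), key=lambda p: p[0])
  let pairs : List (String × String) :=
    PySem.List.sorted (token_history.map (fun td => (pvKey td "token", pvKey td "bloom_id"))) (fun p => p.1) false
  -- while i < n: scan one group per step, appending t when all its blooms equal and t unlinked
  pvScanGroups linked pairs

-- ===== PRECONDITION & SPEC =====
-- Pre_ excludes exactly the inputs where some dict lacks the 'token' key (or, in token_history,
-- the 'bloom_id' key): there Python's d[...] raises KeyError, in A and in B alike.
def Pre_identify_unlinked_tokens_py (token_history : List (List (String × String))) (linked_tokens : List (List (String × String))) : Prop :=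
  (∀ td ∈ token_history, "token" ∈ td.map Prod.fst ∧ "bloom_id" ∈ td.map Prod.fst) ∧
  (∀ lt ∈ linked_tokens, "token" ∈ lt.map Prod.fst)
instance (token_history : List (List (String × String))) (linked_tokens : List (List (String × String))) : Decidable (Pre_identify_unlinked_tokens_py token_history linked_tokens) := by unfold Pre_identify_unlinked_tokens_py; infer_instance

def pvWitness_identify_unlinked_tokens_py : (List (List (String × String))) × (List (List (String × String))) :=
  ([[("token", "a"), ("bloom_id", "b1")], [("token", "c"), ("bloom_id", "b2")]], [[("token", "c")]])

def Spec_identify_unlinked_tokens_py (token_history : List (List (String × String))) (linked_tokens : List (List (String × String))) (out : List String) : Prop := out = identify_unlinked_tokens_py_alt token_history linked_tokens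
instance (token_history : List (List (String × String))) (linked_tokens : List (List (String × String))) (out : List String) : Decidable (Spec_identify_unlinked_tokens_py token_history linked_tokens out) := by unfold Spec_identify_unlinked_tokens_py; infer_instance

-- ===== CLAIM (what is proved, stated in full; the proofs are below) =====
def Claim_equal_identify_unlinked_tokens_py : Prop := ∀ (token_history : List (List (String × String))) (linked_tokens : List (List (String × String))), Dom_identify_unlinked_tokens_py token_history linked_tokens → Pre_identify_unlinked_tokens_py token_history linked_tokens → Spec_identify_unlinked_tokens_py token_history linked_tokens (identify_unlinked_tokens_py token_history linked_tokens)

-- ===== LEMMAS AND PROOFS =====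

-- "token a has a single bloom in S": any two entries of S carrying token a carry the same bloom
def pvUni (S : List (String × String)) (a : String) : Prop :=
  ∀ p ∈ S, ∀ q ∈ S, p.1 = a → q.1 = a → p.2 = q.2

-- A's two-statement dict update ("if absent, insert empty set; then add to the looked-up set") is one `modify`.
theorem pvStepEq (m : PySem.Dict String (PySem.Set String)) (token bloom : String) :
    (let m' := if m.contains token then m else m.insert token PySem.Set.empty
     m'.modify token PySem.Set.empty (fun s => PySem.Set.add s bloom)) =
    m.modify token PySem.Set.empty (fun s => PySem.Set.add s bloom) := by
  by_cases h : m.contains token = true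
  · simp [h]
  · simp only [Bool.not_eq_true] at h
    simp only [h, Bool.false_eq_true, if_false]
    show (m.insert token PySem.Set.empty).insert token _ = m.insert token _
    rw [PySem.Dict.getD_insert_self, PySem.Dict.getD_of_not_contains m _ h]
    apply PySem.Dict.ext
    rw [PySem.Dict.items_insert_of_contains _ _ (PySem.Dict.contains_insert_self m token _),
        PySem.Dict.items_insert_of_not_contains m _ h,
        PySem.Dict.items_insert_of_not_contains m _ h,
        List.map_append]
    have hne : ∀ p ∈ m.items, p.1 ≠ token := by
      intro p hp heq
      have : token ∈ m.keys := heq ▸ PySem.Dict.mem_keys_of_mem_items m hp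
      rw [← PySem.Dict.contains_iff_mem_keys] at this
      simp [h] at this
    congr 1
    · have : m.items.map (fun p => if (p.1 == token) = true then (token, PySem.Set.add PySem.Set.empty bloom) else p) = m.items.map id :=
        List.map_congr_left (fun p hp => by simp [hne p hp])
      simpa using this
    · simp

-- the bloom set the modify-fold accumulates for key t
theorem pvGetD_fold (th : List (List (String × String))) (d : PySem.Dict String (PySem.Set String)) (t : String) :
    (th.foldl (fun m td => m.modify (pvKey td "token") PySem.Set.empty
        (fun s => PySem.Set.add s (pvKey td "bloom_id"))) d).getD t PySem.Set.empty =
    PySem.Set.update (d.getD t PySem.Set.empty)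
      ((th.filter (fun td => pvKey td "token" == t)).map (fun td => pvKey td "bloom_id")) := by
  induction th generalizing d with
  | nil => rfl
  | cons td rest ih =>
    simp only [List.foldl_cons, List.filter_cons]
    rw [ih]
    by_cases h : pvKey td "token" = t
    · simp only [h, beq_self_eq_true, if_true, List.map_cons]
      rw [PySem.Dict.getD_modify, if_pos rfl]
      rfl
    · have hb : (pvKey td "token" == t) = false := by simp [h]
      simp only [hb, Bool.false_eq_true, if_false]
      rw [PySem.Dict.getD_modify]
      simp [Ne.symm h]

-- membership in A's append-if loop over the dict items
theorem pvMem_append_if {ν : Type} (l : List (String × ν)) (cond : String × ν → Bool) (init : List String) (t : String) :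
    t ∈ l.foldl (fun acc p => if cond p then acc ++ [p.1] else acc) init ↔
      t ∈ init ∨ ∃ p ∈ l, cond p = true ∧ p.1 = t := by
  induction l generalizing init with
  | nil => simp
  | cons p rest ih =>
    simp only [List.foldl_cons]
    rw [ih]
    by_cases h : cond p = true
    · simp only [h, if_true, List.mem_append, List.mem_cons]
      aesop
    · have h' : cond p = false := by simpa using h
      simp only [h', Bool.false_eq_true, if_false, List.mem_cons]
      aesop

-- an ∃-over-items condition is a condition on keys and getD, for a dict with Nodup keys
theorem pvItemsMem {ν : Type} (M : PySem.Dict String ν) (hnod : M.keys.Nodup)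
    (cond : String × ν → Bool) (d0 : ν) (a : String) :
    (∃ p ∈ M.items, cond p = true ∧ p.1 = a) ↔ a ∈ M.keys ∧ cond (a, M.getD a d0) = true := by
  constructor
  · rintro ⟨⟨k, v⟩, hp, hc, rfl⟩
    refine ⟨PySem.Dict.mem_keys_of_mem_items M hp, ?_⟩
    have : M.getD k d0 = v := PySem.Dict.getD_of_mem_items M hp hnod d0
    rwa [this]
  · rintro ⟨hk, hc⟩
    have hne : M.get? a ≠ none := fun hn =>
      ((PySem.Dict.get?_eq_none_iff_not_mem_keys M a).mp hn) hk
    obtain ⟨v, hv⟩ := Option.ne_none_iff_exists'.mp hne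
    have hgd : M.getD a d0 = v := PySem.Dict.getD_of_get?_eq_some M d0 hv
    exact ⟨(a, v), PySem.Dict.mem_items_of_get?_eq_some M hv, by rwa [hgd] at hc, rfl⟩

-- a nodup list whose members are all x, with x a member, is [x]
theorem pvNodupSingleton {α : Type} (l : List α) (x : α) (hnod : l.Nodup)
    (hx : x ∈ l) (hall : ∀ y ∈ l, y = x) : l = [x] := by
  cases l with
  | nil => cases hx
  | cons h t =>
    have hh : h = x := hall h (List.mem_cons_self ..)
    have ht : t = [] := by
      cases t with
      | nil => rfl
      | cons y ys =>
        exfalso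
        have hy : y = x := hall y (List.mem_cons_of_mem _ (List.mem_cons_self ..))
        have := (List.nodup_cons.mp hnod).1
        exact this (by rw [hh, ← hy]; exact List.mem_cons_self ..)
    rw [hh, ht]

-- set(bl) has one element iff bl has exactly one distinct value
theorem pvOne {α : Type} [BEq α] [LawfulBEq α] (bl : List α) :
    (PySem.Set.ofList bl).length = 1 ↔ ∃ x, x ∈ bl ∧ ∀ y ∈ bl, y = x := by
  constructor
  · intro h
    obtain ⟨x, hx⟩ : ∃ x, PySem.Set.ofList bl = [x] := by
      cases hs : PySem.Set.ofList bl with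
      | nil => rw [hs] at h; simp at h
      | cons a t =>
        rw [hs] at h
        simp only [List.length_cons] at h
        have : t = [] := List.length_eq_zero_iff.mp (by omega)
        exact ⟨a, by rw [this]⟩
    refine ⟨x, ?_, ?_⟩
    · have : x ∈ PySem.Set.ofList bl := by rw [hx]; exact List.mem_cons_self ..
      exact (PySem.Set.mem_ofList bl x).mp this
    · intro y hy
      have : y ∈ PySem.Set.ofList bl := (PySem.Set.mem_ofList bl y).mpr hy
      rw [hx] at this
      simpa using this
  · rintro ⟨x, hx, hall⟩
    have h1 : PySem.Set.ofList bl = [x] :=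
      pvNodupSingleton _ x (PySem.Set.nodup_ofList bl)
        ((PySem.Set.mem_ofList bl x).mpr hx)
        (fun y hy => hall y ((PySem.Set.mem_ofList bl y).mp hy))
    rw [h1]; rfl

-- everything past the first token-run of a fst-sorted list carries a strictly larger token
theorem pvDrop_gt (t : String) (rest : List (String × String))
    (hp : rest.Pairwise (fun p q => p.1 ≤ q.1)) (hge : ∀ p ∈ rest, t ≤ p.1) :
    ∀ p ∈ rest.dropWhile (fun p => p.1 == t), t < p.1 := by
  induction rest with
  | nil => simp
  | cons x xs ih =>
    rw [List.dropWhile_cons]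
    by_cases hx : x.1 = t
    · simp only [hx, beq_self_eq_true, if_true]
      exact ih (List.Pairwise.of_cons hp) (fun p hp' => hge p (List.mem_cons_of_mem _ hp'))
    · have hb : (x.1 == t) = false := by simp [hx]
      simp only [hb, Bool.false_eq_true, if_false]
      intro p hp'
      have hxt : t < x.1 := lt_of_le_of_ne (hge x (List.mem_cons_self ..)) (Ne.symm hx)
      rcases List.mem_cons.mp hp' with rfl | hmem
      · exact hxt
      · exact lt_of_lt_of_le hxt ((List.pairwise_cons.mp hp).1 p hmem)

-- membership in the group scan, over a fst-sorted pair list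
theorem pvScan_mem (linked : PySem.Set String) (S : List (String × String))
    (hS : S.Pairwise (fun p q => p.1 ≤ q.1)) (a : String) :
    a ∈ pvScanGroups linked S ↔
      a ∈ S.map Prod.fst ∧ pvUni S a ∧ linked.contains a = false := by
  induction S using pvScanGroups.induct with
  | case1 => simp [pvScanGroups, pvUni]
  | case2 t b rest rest' ih =>
    set grp := rest.takeWhile (fun p => p.1 == t) with hgrpdef
    set same := grp.all (fun p => p.2 == b) with hsamedef
    have hge : ∀ p ∈ rest, t ≤ p.1 := (List.pairwise_cons.mp hS).1
    have hrest : rest.Pairwise (fun p q => p.1 ≤ q.1) := (List.pairwise_cons.mp hS).2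
    have hgt : ∀ p ∈ rest', t < p.1 := pvDrop_gt t rest hrest hge
    have hrest' : rest'.Pairwise (fun p q => p.1 ≤ q.1) :=
      hrest.sublist (List.dropWhile_sublist _)
    have hgrp : ∀ p ∈ grp, p.1 = t := fun p hp => by
      have := List.mem_takeWhile_imp hp; simpa using this
    have hsplit : rest = grp ++ rest' := (List.takeWhile_append_dropWhile ..).symm
    have hmemS : ∀ p : String × String, p ∈ (t, b) :: rest ↔ p = (t, b) ∨ p ∈ grp ∨ p ∈ rest' := by
      intro p; rw [hsplit]; simp
    have ih' := ih hrest'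
    rw [pvScanGroups]
    simp only [List.mem_append]
    by_cases hat : a = t
    · subst hat
      have hnot : a ∉ pvScanGroups linked rest' := by
        intro hmem
        obtain ⟨p, hp, hpe⟩ := List.mem_map.mp (ih'.mp hmem).1
        exact absurd (hpe ▸ hgt p hp) (lt_irrefl a)
      have hsame : same = true ↔ pvUni ((a, b) :: rest) a := by
        constructor
        · intro hs p hp q hq hpa hqa
          have hval : ∀ r ∈ (a, b) :: rest, r.1 = a → r.2 = b := by
            intro r hr hra
            rcases (hmemS r).mp hr with rfl | hg | hr'
            · rfl
            · have := List.all_eq_true.mp hs r hg; simpa using this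
            · exact absurd (hgt r hr') (by rw [hra]; exact lt_irrefl a)
          rw [hval p hp hpa, hval q hq hqa]
        · intro hu
          apply List.all_eq_true.mpr
          intro p hp
          have hpr : p ∈ (a, b) :: rest := (hmemS p).mpr (Or.inr (Or.inl hp))
          have := hu p hpr (a, b) (List.mem_cons_self ..) (hgrp p hp) rfl
          simpa using this
      constructor
      · intro hmem
        rcases hmem with hin | hmem'
        · by_cases hc : (same && !(linked.contains a)) = true
          · rw [if_pos hc] at hin
            have ⟨hs, hl⟩ := Bool.and_eq_true_iff.mp hc
            exact ⟨by simp, hsame.mp hs, by simpa using hl⟩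
          · rw [if_neg hc] at hin; cases hin
        · exact absurd hmem' hnot
      · rintro ⟨_, hu, hl⟩
        left
        rw [if_pos (Bool.and_eq_true_iff.mpr ⟨hsame.mpr hu, by simpa using hl⟩)]
        exact List.mem_cons_self ..
    · have hne : ∀ p ∈ grp, p.1 ≠ a := fun p hp => by rw [hgrp p hp]; exact Ne.symm hat
      have hmap : a ∈ ((t, b) :: rest).map Prod.fst ↔ a ∈ rest'.map Prod.fst := by
        simp only [List.mem_map]
        constructor
        · rintro ⟨p, hp, rfl⟩
          rcases (hmemS p).mp hp with rfl | hg | hr'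
          · exact absurd rfl hat
          · exact absurd rfl (hne p hg)
          · exact ⟨p, hr', rfl⟩
        · rintro ⟨p, hp, rfl⟩
          exact ⟨p, (hmemS p).mpr (Or.inr (Or.inr hp)), rfl⟩
      have huni : pvUni ((t, b) :: rest) a ↔ pvUni rest' a := by
        constructor
        · intro hu p hp q hq hpa hqa
          exact hu p ((hmemS p).mpr (Or.inr (Or.inr hp))) q ((hmemS q).mpr (Or.inr (Or.inr hq))) hpa hqa
        · intro hu p hp q hq hpa hqa
          have hp' : p ∈ rest' := by
            rcases (hmemS p).mp hp with rfl | hg | h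
            · exact absurd hpa (fun h => hat h.symm)
            · exact absurd hpa (hne p hg)
            · exact h
          have hq' : q ∈ rest' := by
            rcases (hmemS q).mp hq with rfl | hg | h
            · exact absurd hqa (fun h => hat h.symm)
            · exact absurd hqa (hne q hg)
            · exact h
          exact hu p hp' q hq' hpa hqa
      have hfirst : a ∉ (if same && !(linked.contains t) then [t] else []) := by
        split <;> simp [hat]
      constructor
      · intro hmem
        rcases hmem with hin | hmem'
        · exact absurd hin hfirst
        · obtain ⟨h1, h2, h3⟩ := ih'.mp hmem'
          exact ⟨hmap.mpr h1, huni.mpr h2, h3⟩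
      · rintro ⟨h1, h2, h3⟩
        exact Or.inr (ih'.mpr ⟨hmap.mp h1, huni.mp h2, h3⟩)

-- the scan's output is strictly increasing (hence already sorted and nodup)
theorem pvScan_pairwise (linked : PySem.Set String) (S : List (String × String))
    (hS : S.Pairwise (fun p q => p.1 ≤ q.1)) :
    (pvScanGroups linked S).Pairwise (· < ·) := by
  induction S using pvScanGroups.induct with
  | case1 => simp [pvScanGroups]
  | case2 t b rest rest' ih =>
    set grp := rest.takeWhile (fun p => p.1 == t) with hgrpdef
    set same := grp.all (fun p => p.2 == b) with hsamedef
    have hge : ∀ p ∈ rest, t ≤ p.1 := (List.pairwise_cons.mp hS).1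
    have hrest : rest.Pairwise (fun p q => p.1 ≤ q.1) := (List.pairwise_cons.mp hS).2
    have hgt : ∀ p ∈ rest', t < p.1 := pvDrop_gt t rest hrest hge
    have hrest' : rest'.Pairwise (fun p q => p.1 ≤ q.1) :=
      hrest.sublist (List.dropWhile_sublist _)
    have hrec := ih hrest'
    have hsub : ∀ a ∈ pvScanGroups linked rest', t < a := by
      intro a ha
      obtain ⟨p, hp, hpe⟩ := List.mem_map.mp ((pvScan_mem linked rest' hrest' a).mp ha).1
      exact hpe ▸ hgt p hp
    rw [pvScanGroups]
    apply List.pairwise_append.mpr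
    refine ⟨?_, hrec, ?_⟩
    · split <;> simp
    · intro x hx y hy
      have hxt : x = t := by
        by_cases hc : (same && !(linked.contains t)) = true
        · rw [if_pos hc] at hx; simpa using hx
        · rw [if_neg hc] at hx; cases hx
      exact hxt ▸ hsub y hy

-- the distinct blooms of token a form a single value iff a's entries agree pairwise (pvUni)
theorem pvUniIff (S : List (String × String)) (bl : List String) (a : String)
    (hbl : ∀ y, y ∈ bl ↔ ∃ p ∈ S, p.1 = a ∧ p.2 = y)
    (hmem : a ∈ S.map Prod.fst) :
    ((∃ x, x ∈ bl ∧ ∀ y ∈ bl, y = x) ↔ pvUni S a) := by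
  constructor
  · rintro ⟨x, _, hall⟩ p hp q hq hpa hqa
    have hpx : p.2 = x := hall p.2 ((hbl p.2).mpr ⟨p, hp, hpa, rfl⟩)
    have hqx : q.2 = x := hall q.2 ((hbl q.2).mpr ⟨q, hq, hqa, rfl⟩)
    rw [hpx, hqx]
  · intro hu
    obtain ⟨p, hp, hpa⟩ := List.mem_map.mp hmem
    refine ⟨p.2, (hbl p.2).mpr ⟨p, hp, hpa, rfl⟩, ?_⟩
    intro y hy
    obtain ⟨q, hq, hqa, hqy⟩ := (hbl y).mp hy
    rw [← hqy]
    exact hu q hq p hp hqa hpa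

-- ===== VERDICT (by name: the statement is the Claim_ definition above) =====
theorem identify_unlinked_tokens_py_spec : Claim_equal_identify_unlinked_tokens_py := by
  intro th ltk _ _
  unfold Spec_identify_unlinked_tokens_py identify_unlinked_tokens_py identify_unlinked_tokens_py_alt
  dsimp only
  -- rewrite A's loop body to the single-modify form
  rw [show (fun (m : PySem.Dict String (PySem.Set String)) (td : List (String × String)) =>
        (if m.contains (pvKey td "token") then m else m.insert (pvKey td "token") PySem.Set.empty).modify
          (pvKey td "token") PySem.Set.empty (fun s => PySem.Set.add s (pvKey td "bloom_id")))
      = (fun m td => m.modify (pvKey td "token") PySem.Set.empty (fun s => PySem.Set.add s (pvKey td "bloom_id")))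
    from funext fun m => funext fun td => pvStepEq m (pvKey td "token") (pvKey td "bloom_id")]
  set lk : PySem.Set String := PySem.Set.ofList (ltk.map (fun lt => pvKey lt "token")) with hlk
  set L : List (String × String) := th.map (fun td => (pvKey td "token", pvKey td "bloom_id")) with hL
  set S : List (String × String) := PySem.List.sorted L (fun p => p.1) false with hSdef
  set M : PySem.Dict String (PySem.Set String) :=
    th.foldl (fun m td => m.modify (pvKey td "token") PySem.Set.empty
      (fun s => PySem.Set.add s (pvKey td "bloom_id"))) PySem.Dict.empty with hM
  have hSp : S.Pairwise (fun p q => p.1 ≤ q.1) := PySem.List.sorted_pairwise L (fun p => p.1)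
  have hSperm : S.Perm L := PySem.List.sorted_perm L (fun p => p.1) false
  have hnod : M.keys.Nodup :=
    PySem.Dict.nodup_keys_foldl_modify_key th (fun td => pvKey td "token") PySem.Set.empty
      (fun _ td => fun s => PySem.Set.add s (pvKey td "bloom_id")) PySem.Dict.empty PySem.Dict.nodup_keys_empty
  have hkeys : M.keys = PySem.Set.ofList (th.map (fun td => pvKey td "token")) :=
    PySem.Dict.keys_foldl_modify_key th (fun td => pvKey td "token") PySem.Set.empty
      (fun _ td => fun s => PySem.Set.add s (pvKey td "bloom_id")) PySem.Dict.empty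
  apply PySem.List.sorted_id_eq_of_perm_of_pairwise
  · -- scan ~ set(unlinked): both nodup, same members
    apply (List.perm_ext_iff_of_nodup
      (((pvScan_pairwise lk S hSp)).imp (fun h => ne_of_lt h))
      (PySem.Set.nodup_ofList _)).mpr
    intro a
    rw [pvScan_mem lk S hSp a, PySem.Set.mem_ofList, pvMem_append_if,
        pvItemsMem M hnod _ PySem.Set.empty a, hkeys]
    simp only [List.not_mem_nil, false_or]
    have hget : M.getD a PySem.Set.empty
        = PySem.Set.ofList ((th.filter (fun td => pvKey td "token" == a)).map (fun td => pvKey td "bloom_id")) := by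
      rw [hM, pvGetD_fold, PySem.Dict.getD_empty]
      rfl
    rw [hget]
    set bl : List String := (th.filter (fun td => pvKey td "token" == a)).map (fun td => pvKey td "bloom_id") with hbl
    have hmapS : a ∈ S.map Prod.fst ↔ a ∈ th.map (fun td => pvKey td "token") := by
      constructor
      · rintro h
        obtain ⟨p, hp, rfl⟩ := List.mem_map.mp h
        obtain ⟨td, htd, rfl⟩ := List.mem_map.mp (hSperm.mem_iff.mp hp)
        exact List.mem_map.mpr ⟨td, htd, rfl⟩
      · intro h
        obtain ⟨td, htd, rfl⟩ := List.mem_map.mp h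
        exact List.mem_map.mpr ⟨(pvKey td "token", pvKey td "bloom_id"),
          hSperm.mem_iff.mpr (List.mem_map.mpr ⟨td, htd, rfl⟩), rfl⟩
    have hblmem : ∀ y, y ∈ bl ↔ ∃ p ∈ S, p.1 = a ∧ p.2 = y := by
      intro y
      rw [hbl]
      constructor
      · intro h
        obtain ⟨td, htd, rfl⟩ := List.mem_map.mp h
        have h1 := List.of_mem_filter htd
        exact ⟨(pvKey td "token", pvKey td "bloom_id"),
          hSperm.mem_iff.mpr (List.mem_map.mpr ⟨td, List.mem_of_mem_filter htd, rfl⟩),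
          by simpa using h1, rfl⟩
      · rintro ⟨p, hp, hpa, rfl⟩
        obtain ⟨td, htd, rfl⟩ := List.mem_map.mp (hSperm.mem_iff.mp hp)
        exact List.mem_map.mpr ⟨td, List.mem_filter.mpr ⟨htd, by simpa using hpa⟩, rfl⟩
    constructor
    · rintro ⟨h1, h2, h3⟩
      refine ⟨(PySem.Set.mem_ofList _ _).mpr (hmapS.mp h1), ?_⟩
      have hone : (PySem.Set.ofList bl).length = 1 :=
        (pvOne bl).mpr ((pvUniIff S bl a hblmem h1).mpr h2)
      apply Bool.and_eq_true_iff.mpr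
      refine ⟨?_, by simpa using h3⟩
      have : PySem.Set.len (PySem.Set.ofList bl) = 1 := by
        simp [PySem.Set.len, hone]
      simpa using this
    · rintro ⟨h1, h2⟩
      have ⟨hc1, hc2⟩ := Bool.and_eq_true_iff.mp h2
      have hone : (PySem.Set.ofList bl).length = 1 := by
        have : PySem.Set.len (PySem.Set.ofList bl) = 1 := by simpa using hc1
        simp [PySem.Set.len] at this
        exact_mod_cast this
      have hmem : a ∈ S.map Prod.fst := hmapS.mpr ((PySem.Set.mem_ofList _ _).mp h1)
      exact ⟨hmem, (pvUniIff S bl a hblmem hmem).mp ((pvOne bl).mp hone),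
        by simpa using hc2⟩
  · exact (pvScan_pairwise lk S hSp).imp (fun h => le_of_lt h)
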